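-- pv_equiv track=rewrite | github.com/peterpei666/leetcode_python | 3875. Construct Uniform Parity Array I.py | uniformArray
-- ===== SOURCE A (Python) =====
-- def uniformArray(nums1: list[int]) -> bool:
--     n = len(nums1)
--     odd = 0
--     for i in range(n):
--         if nums1[i] & 1:
--             odd += 1
--     valid_odd = True
--     valid_even = True
--     for i in range(n):
--         if nums1[i] & 1:
--             valid_even &= odd > 1
--         else:
--             valid_odd &= odd > 0
--     return valid_odd or valid_even
-- ===== SOURCE B (Python) =====
-- def uniformArray(nums1: list[int]) -> bool:
--     odd = sum(1 for x in nums1 if x & 1)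
--     even = len(nums1) - odd
--     valid_odd = even == 0 or odd > 0
--     valid_even = odd == 0 or odd > 1
--     return valid_odd or valid_even
-- ===== Notes on version B (the rewrite author's own statement) =====
-- stated objective: simpler
-- what changed: Replaces A's second O(n) loop (which only ANDs constant comparisons per element) with O(1) closed-form arithmetic on the odd/even counts from a single counting pass.
import Mathlib
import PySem

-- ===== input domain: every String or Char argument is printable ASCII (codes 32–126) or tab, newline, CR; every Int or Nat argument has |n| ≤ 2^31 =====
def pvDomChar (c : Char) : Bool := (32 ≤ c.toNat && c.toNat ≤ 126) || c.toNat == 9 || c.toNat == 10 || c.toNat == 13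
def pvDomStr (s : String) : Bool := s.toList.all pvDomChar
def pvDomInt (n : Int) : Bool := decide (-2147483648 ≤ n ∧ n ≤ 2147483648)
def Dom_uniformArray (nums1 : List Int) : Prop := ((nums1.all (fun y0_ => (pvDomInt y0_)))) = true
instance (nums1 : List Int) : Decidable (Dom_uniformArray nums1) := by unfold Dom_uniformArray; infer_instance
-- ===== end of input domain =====

-- B replaces A's second accumulation loop by a closed-form boolean on the odd/even counts (objective: simpler).

-- ===== PORT A =====
-- A: first loop counts odd elements, second loop ANDs 'odd > 1' / 'odd > 0' per element; 'x & 1' is PySem.Int.band x 1 (Python-exact on negatives).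
def uniformArray (nums1 : List Int) : Bool :=
  let odd : Int := nums1.foldl (fun acc x => if PySem.Int.band x 1 ≠ 0 then acc + 1 else acc) 0
  let p : Bool × Bool := nums1.foldl
    (fun (vs : Bool × Bool) x =>
      if PySem.Int.band x 1 ≠ 0 then (vs.1, vs.2 && decide (odd > 1))
      else (vs.1 && decide (odd > 0), vs.2))
    (true, true)
  p.1 || p.2

-- ===== PORT B =====
-- B: one counting pass (sum of a filtered generator = countP), then O(1) arithmetic.
def uniformArray_alt (nums1 : List Int) : Bool :=
  let odd : Int := (nums1.countP (fun x => decide (PySem.Int.band x 1 ≠ 0)) : Int)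
  let even : Int := (nums1.length : Int) - odd
  let valid_odd : Bool := decide (even = 0) || decide (odd > 0)
  let valid_even : Bool := decide (odd = 0) || decide (odd > 1)
  valid_odd || valid_even

-- ===== PRECONDITION & SPEC =====
def Spec_uniformArray (nums1 : List Int) (out : Bool) : Prop := out = uniformArray_alt nums1
instance (nums1 : List Int) (out : Bool) : Decidable (Spec_uniformArray nums1 out) := by unfold Spec_uniformArray; infer_instance

-- ===== CLAIM (what is proved, stated in full; the proofs are below) =====
def Claim_equal_uniformArray : Prop := ∀ (nums1 : List Int), Dom_uniformArray nums1 → Spec_uniformArray nums1 (uniformArray nums1)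

-- ===== LEMMAS AND PROOFS =====

-- A's counting loop computes acc + (number of odd elements).
theorem pv_countLoop (l : List Int) (acc : Int) :
    l.foldl (fun acc x => if PySem.Int.band x 1 ≠ 0 then acc + 1 else acc) acc
      = acc + (l.countP (fun x => decide (PySem.Int.band x 1 ≠ 0)) : Int) := by
  induction l generalizing acc with
  | nil => simp
  | cons x t ih =>
    simp only [List.foldl_cons, List.countP_cons, ih]
    by_cases h : PySem.Int.band x 1 ≠ 0 <;> simp [h] <;> omega

-- A's second loop: each component is the seed ANDed with (all elements skip this branch OR the constant).
theorem pv_validLoop (c : Int) (l : List Int) (b1 b2 : Bool) :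
    l.foldl
      (fun (vs : Bool × Bool) x =>
        if PySem.Int.band x 1 ≠ 0 then (vs.1, vs.2 && decide (c > 1))
        else (vs.1 && decide (c > 0), vs.2))
      (b1, b2)
      = (b1 && (l.all (fun x => decide (PySem.Int.band x 1 ≠ 0)) || decide (c > 0)),
         b2 && (l.all (fun x => decide (PySem.Int.band x 1 = 0)) || decide (c > 1))) := by
  induction l generalizing b1 b2 with
  | nil => simp
  | cons x t ih =>
    simp only [List.foldl_cons, List.all_cons]
    by_cases h : PySem.Int.band x 1 ≠ 0
    · simp only [if_pos h, ih, Prod.mk.injEq]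
      refine ⟨by simp [h], ?_⟩
      cases b2 <;> cases decide (c > 1) <;> simp [h]
    · simp only [if_neg h, ih, Prod.mk.injEq]
      refine ⟨?_, by simp [not_not.mp h]⟩
      cases b1 <;> cases decide (c > 0) <;> simp [h]

theorem pv_equiv (l : List Int) : uniformArray l = uniformArray_alt l := by
  unfold uniformArray uniformArray_alt
  simp only [pv_countLoop, pv_validLoop, zero_add, Bool.true_and]
  have hle := List.countP_le_length (l := l) (p := fun x => decide (PySem.Int.band x 1 ≠ 0))
  have hall : l.all (fun x => decide (PySem.Int.band x 1 ≠ 0))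
      = decide (((l.length : Int) - (l.countP (fun x => decide (PySem.Int.band x 1 ≠ 0)) : Int)) = 0) := by
    rw [Bool.eq_iff_iff]; simp only [List.all_eq_true, decide_eq_true_eq]
    constructor
    · intro h
      have : l.countP (fun x => decide (PySem.Int.band x 1 ≠ 0)) = l.length :=
        List.countP_eq_length.mpr (fun a ha => by simpa using h a ha)
      omega
    · intro h a ha
      have hc : l.countP (fun x => decide (PySem.Int.band x 1 ≠ 0)) = l.length := by omega
      simpa using List.countP_eq_length.mp hc a ha
  have hnone : l.all (fun x => decide (PySem.Int.band x 1 = 0))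
      = decide ((l.countP (fun x => decide (PySem.Int.band x 1 ≠ 0)) : Int) = 0) := by
    rw [Bool.eq_iff_iff]; simp only [List.all_eq_true, decide_eq_true_eq]
    constructor
    · intro h
      have : l.countP (fun x => decide (PySem.Int.band x 1 ≠ 0)) = 0 :=
        List.countP_eq_zero.mpr (fun a ha => by simpa using h a ha)
      omega
    · intro h a ha
      have hc : l.countP (fun x => decide (PySem.Int.band x 1 ≠ 0)) = 0 := by omega
      simpa using List.countP_eq_zero.mp hc a ha
  rw [hall, hnone]

-- ===== VERDICT (by name: the statement is the Claim_ definition above) =====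
theorem uniformArray_spec : Claim_equal_uniformArray := by
  intro nums1 _
  unfold Spec_uniformArray
  exact pv_equiv nums1
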